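-- pv_equiv track=rewrite | github.com/Qenszu/workshop | python/WDI/zestaw_2/zad_69.py | najdl_ciag
-- ===== SOURCE A (Python) =====
-- end = None
--
-- def najdl_ciag(tab, n):
--     max_dl_ciagu = 0
--     for i in range(n - 1):
--         dl_ciagu = dlugosc_ciagu(tab, i, n)
--         if max_dl_ciagu < abs(dl_ciagu):
--             max_dl_ciagu = abs(dl_ciagu)
--     end
--
--     return max_dl_ciagu
--
-- def dlugosc_ciagu(tab, index, n):
--     dl_ciagu = 1
--     roznica = tab[index+1] - tab[index]
--     index += 1
--     while index < n-1:
--         if tab[index] + roznica == tab[index + 1]: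
--             dl_ciagu += 1
--             index += 1
--         else:
--             break
--     end
--
--     if roznica < 0:
--         return -(dl_ciagu + 1)
--     else:
--         return dl_ciagu + 1
-- ===== SOURCE B (Python) =====
-- def najdl_ciag(tab, n):
--     # Single pass: track the current constant-difference run length, reset when the difference changes.
--     if n < 2:
--         return 0
--     best = 2
--     cur = 2
--     prev = tab[1] - tab[0]
--     for i in range(2, n):
--         d = tab[i] - tab[i - 1]
--         if d == prev:
--             cur += 1
--         else:
--             cur = 2
--             prev = d
--         if cur > best:
--             best = cur
--     return best
-- ===== Notes on version B (the rewrite author's own statement) =====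
-- stated objective: faster
-- what changed: Replaced the per-start rescan (for each index, walk forward while the difference repeats) by a single left-to-right pass that keeps the current run length and resets it when the consecutive difference changes.
import Mathlib
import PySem

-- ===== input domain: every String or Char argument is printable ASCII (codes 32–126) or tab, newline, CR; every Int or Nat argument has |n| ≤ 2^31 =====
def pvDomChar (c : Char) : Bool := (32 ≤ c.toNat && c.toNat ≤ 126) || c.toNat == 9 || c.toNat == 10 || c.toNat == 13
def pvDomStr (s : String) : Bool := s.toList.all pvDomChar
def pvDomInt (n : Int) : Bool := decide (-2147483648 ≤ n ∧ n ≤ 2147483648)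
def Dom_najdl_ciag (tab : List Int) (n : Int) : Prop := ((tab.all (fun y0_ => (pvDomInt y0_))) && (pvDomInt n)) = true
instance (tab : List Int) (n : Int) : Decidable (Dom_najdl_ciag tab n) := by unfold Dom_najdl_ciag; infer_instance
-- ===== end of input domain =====

-- B replaces A's quadratic per-start rescan by one linear pass tracking the current run; return values proved equal.

-- tab[i] (indices used are in range under Pre_; default 0 elsewhere)
def pvGet (tab : List Int) (i : Int) : Int := PySem.List.pyGetD tab i 0

-- ===== PORT A =====
-- the `while index < n-1` loop of dlugosc_ciagu
def dlLoop (tab : List Int) (n roznica : Int) (index dl : Int) : Int :=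
  if _h : index < n - 1 then
    if pvGet tab index + roznica = pvGet tab (index + 1) then
      dlLoop tab n roznica (index + 1) (dl + 1)
    else dl
  else dl
termination_by (n - 1 - index).toNat
decreasing_by omega

def dlugosc_ciagu (tab : List Int) (index n : Int) : Int :=
  let roznica := pvGet tab (index + 1) - pvGet tab index
  let dl := dlLoop tab n roznica (index + 1) 1
  if roznica < 0 then -(dl + 1) else dl + 1

def najdl_ciag (tab : List Int) (n : Int) : Int :=
  (PySem.List.pyRange 0 (n - 1) 1).foldl
    (fun max_dl i =>
      let dl := dlugosc_ciagu tab i n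
      if max_dl < |dl| then |dl| else max_dl) 0

-- ===== PORT B =====
def najdl_ciag_alt (tab : List Int) (n : Int) : Int :=
  if n < 2 then 0
  else
    ((PySem.List.pyRange 2 n 1).foldl
      (fun (st : Int × Int × Int) i =>
        let d := pvGet tab i - pvGet tab (i - 1)
        let cur := if d = st.2.2 then st.2.1 + 1 else 2
        let prev := if d = st.2.2 then st.2.2 else d
        ((if cur > st.1 then cur else st.1), cur, prev))
      (2, 2, pvGet tab 1 - pvGet tab 0)).1

-- ===== PRECONDITION & SPEC =====
-- Python A raises IndexError exactly when n ≥ 2 and n exceeds len(tab); those inputs are excluded.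
def Pre_najdl_ciag (tab : List Int) (n : Int) : Prop := n < 2 ∨ n ≤ (tab.length : Int)
instance (tab : List Int) (n : Int) : Decidable (Pre_najdl_ciag tab n) := by unfold Pre_najdl_ciag; infer_instance

def pvWitness_najdl_ciag : List Int × Int := ([1, 3, 5, 0], 4)

def Spec_najdl_ciag (tab : List Int) (n : Int) (out : Int) : Prop := out = najdl_ciag_alt tab n
instance (tab : List Int) (n : Int) (out : Int) : Decidable (Spec_najdl_ciag tab n out) := by unfold Spec_najdl_ciag; infer_instance

-- ===== CLAIM (what is proved, stated in full; the proofs are below) =====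
def Claim_equal_najdl_ciag : Prop := ∀ (tab : List Int) (n : Int), Dom_najdl_ciag tab n → Pre_najdl_ciag tab n → Spec_najdl_ciag tab n (najdl_ciag tab n)

-- ===== LEMMAS AND PROOFS =====

-- length of the constant prefix equal to r (how far A's while loop runs)
def twlen (r : Int) : List Int → Nat
  | [] => 0
  | d :: t => if d = r then twlen r t + 1 else 0

-- A's outer loop over the list of consecutive differences, accumulator form
def amax : List Int → Int → Int
  | [], acc => acc
  | d :: t, acc => amax t (max acc (2 + (twlen d t : Int)))

-- B's scan over the list of consecutive differences
def bscan : List Int → Int → Int → Int → Int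
  | [], best, _, _ => best
  | d :: t, best, cur, prev =>
      if d = prev then bscan t (max best (cur + 1)) (cur + 1) prev
      else bscan t (max best 2) 2 d

-- consecutive differences of tab at positions i, i+1, …, n-2
def dsFrom (tab : List Int) (n i : Int) : List Int :=
  (List.range (n - 1 - i).toNat).map (fun k : Nat => pvGet tab (i + (k : Int) + 1) - pvGet tab (i + (k : Int)))

theorem dsFrom_nil (tab : List Int) (n i : Int) (h : n - 1 ≤ i) : dsFrom tab n i = [] := by
  unfold dsFrom
  rw [show (n - 1 - i).toNat = 0 from by omega]
  rfl

theorem dsFrom_cons (tab : List Int) (n i : Int) (h : i < n - 1) :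
    dsFrom tab n i = (pvGet tab (i + 1) - pvGet tab i) :: dsFrom tab n (i + 1) := by
  unfold dsFrom
  rw [show (n - 1 - i).toNat = (n - 1 - (i + 1)).toNat + 1 from by omega, List.range_succ_eq_map,
      List.map_cons, List.map_map]
  refine congrArg₂ List.cons ?_ ?_
  · norm_num
  · refine List.map_congr_left ?_
    intro k _
    simp only [Function.comp]
    push_cast
    ring_nf

theorem twlen_nonneg (r : Int) (l : List Int) : (0 : Int) ≤ (twlen r l : Int) := Int.natCast_nonneg _

theorem amax_acc (l : List Int) : ∀ acc : Int, 0 ≤ acc → amax l acc = max acc (amax l 0) := by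
  induction l with
  | nil => intro acc h; simp [amax]; omega
  | cons d t ih =>
    intro acc h
    have hv : (0 : Int) ≤ 2 + (twlen d t : Int) := by have := twlen_nonneg d t; omega
    simp only [amax]
    rw [ih (max acc (2 + (twlen d t : Int))) (by omega), ih (max 0 (2 + (twlen d t : Int))) (by omega)]
    omega

theorem amax_nonneg (l : List Int) (acc : Int) (h : 0 ≤ acc) : 0 ≤ amax l acc := by
  induction l generalizing acc with
  | nil => simpa [amax]
  | cons d t ih => simp only [amax]; exact ih _ (by omega)

theorem bscan_eq (l : List Int) : ∀ prev cur best : Int, 2 ≤ cur → cur ≤ best →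
    bscan l best cur prev = max best (max (cur + (twlen prev l : Int)) (amax l 0)) := by
  induction l with
  | nil => intro prev cur best h1 h2; simp [bscan, twlen, amax]; omega
  | cons d t ih =>
    intro prev cur best h1 h2
    have htw := twlen_nonneg prev t
    have htw' := twlen_nonneg d t
    have ha0 := amax_nonneg t 0 le_rfl
    have hamax : amax (d :: t) 0 = max (2 + (twlen d t : Int)) (amax t 0) := by
      simp only [amax]
      rw [amax_acc t _ (by omega)]
      omega
    by_cases hd : d = prev
    · simp only [bscan, if_pos hd]
      rw [ih prev (cur + 1) (max best (cur + 1)) (by omega) (by omega), hamax]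
      subst hd
      simp only [twlen]
      push_cast
      omega
    · simp only [bscan, if_neg hd]
      rw [ih d 2 (max best 2) (by omega) (by omega), hamax]
      simp only [twlen, if_neg hd]
      push_cast
      omega

theorem dlLoop_eq (tab : List Int) (n r : Int) :
    ∀ i dl : Int, dlLoop tab n r i dl = dl + (twlen r (dsFrom tab n i) : Int) := by
  intro i dl
  by_cases h : i < n - 1
  · rw [dsFrom_cons tab n i h]
    rw [dlLoop]
    by_cases hc : pvGet tab i + r = pvGet tab (i + 1)
    · rw [dif_pos h, if_pos hc, dlLoop_eq tab n r (i + 1) (dl + 1)]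
      have : pvGet tab (i + 1) - pvGet tab i = r := by omega
      simp only [twlen, if_pos this]
      push_cast
      ring
    · rw [dif_pos h, if_neg hc]
      have : ¬ (pvGet tab (i + 1) - pvGet tab i = r) := by omega
      simp [twlen, this]
  · rw [dsFrom_nil tab n i (by omega), dlLoop, dif_neg h]
    simp [twlen]
termination_by i dl => (n - 1 - i).toNat
decreasing_by omega

-- the per-start value A computes is 2 + the run length of the differences from i+1
theorem dlugosc_abs (tab : List Int) (i n : Int) (h : i < n - 1) :
    |dlugosc_ciagu tab i n| = 2 + (twlen (pvGet tab (i + 1) - pvGet tab i) (dsFrom tab n (i + 1)) : Int) := by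
  simp only [dlugosc_ciagu]
  rw [dlLoop_eq]
  have := twlen_nonneg (pvGet tab (i + 1) - pvGet tab i) (dsFrom tab n (i + 1))
  split
  · rw [abs_of_nonpos (by omega)]; ring
  · rw [abs_of_nonneg (by omega)]; ring

theorem foldA_eq (tab : List Int) (n : Int) :
    ∀ i acc : Int,
      (PySem.List.pyRange i (n - 1) 1).foldl
        (fun max_dl j =>
          let dl := dlugosc_ciagu tab j n
          if max_dl < |dl| then |dl| else max_dl) acc = amax (dsFrom tab n i) acc := by
  intro i acc
  by_cases h : i < n - 1
  · rw [PySem.List.pyRange_one_cons h, dsFrom_cons tab n i h]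
    simp only [List.foldl_cons, amax]
    rw [foldA_eq tab n (i + 1)]
    congr 1
    rw [dlugosc_abs tab i n h]
    omega
  · rw [PySem.List.pyRange_one_eq_nil (by omega), dsFrom_nil tab n i (by omega)]
    simp [amax]
termination_by i acc => (n - 1 - i).toNat
decreasing_by omega

theorem foldB_eq (tab : List Int) (n : Int) :
    ∀ (i best cur prev : Int),
      ((PySem.List.pyRange i n 1).foldl
        (fun (st : Int × Int × Int) j =>
          let d := pvGet tab j - pvGet tab (j - 1)
          let cur := if d = st.2.2 then st.2.1 + 1 else 2
          let prev := if d = st.2.2 then st.2.2 else d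
          ((if cur > st.1 then cur else st.1), cur, prev))
        (best, cur, prev)).1 = bscan (dsFrom tab n (i - 1)) best cur prev := by
  intro i best cur prev
  by_cases h : i < n
  · rw [PySem.List.pyRange_one_cons h, dsFrom_cons tab n (i - 1) (by omega),
        show i - 1 + 1 = i from by ring]
    simp only [List.foldl_cons]
    rw [foldB_eq tab n (i + 1), show i + 1 - 1 = i from by ring]
    by_cases hd : pvGet tab i - pvGet tab (i - 1) = prev
    · simp only [bscan, if_pos hd]
      rw [show (if cur + 1 > best then cur + 1 else best) = max best (cur + 1) from by split <;> omega]
    · simp only [bscan, if_neg hd]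
      rw [show (if (2 : Int) > best then 2 else best) = max best 2 from by split <;> omega]
  · rw [PySem.List.pyRange_one_eq_nil (by omega), dsFrom_nil tab n (i - 1) (by omega)]
    simp [bscan]
termination_by i best cur prev => (n - i).toNat
decreasing_by omega

-- ===== VERDICT (by name: the statement is the Claim_ definition above) =====
theorem najdl_ciag_spec : Claim_equal_najdl_ciag := by
  intro tab n _ _
  unfold Spec_najdl_ciag najdl_ciag najdl_ciag_alt
  rw [foldA_eq tab n 0 0]
  by_cases h2 : n < 2
  · rw [if_pos h2, dsFrom_nil tab n 0 (by omega)]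
    simp [amax]
  · rw [if_neg h2]
    rw [foldB_eq tab n 2 2 2 (pvGet tab 1 - pvGet tab 0)]
    rw [show (2 : Int) - 1 = 1 by norm_num]
    rw [dsFrom_cons tab n 0 (by omega)]
    simp only [amax, zero_add]
    rw [amax_acc _ _ (by have := twlen_nonneg (pvGet tab 1 - pvGet tab 0) (dsFrom tab n 1); omega),
        bscan_eq _ _ _ _ (by omega) (by omega)]
    have h1 := twlen_nonneg (pvGet tab 1 - pvGet tab 0) (dsFrom tab n 1)
    have h2 := amax_nonneg (dsFrom tab n 1) 0 le_rfl
    omega
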